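-- pv_equiv track=rewrite | github.com/robotdognz/OxfordPropaedia | pipeline/macropaedia_2010/extract_propaedia_suggested_reading.py | clean_dense_crop_lines
-- ===== SOURCE A (Python) =====
-- def clean_dense_crop_lines(lines: list[str]) -> list[str]:
--     cleaned: list[str] = []
--     for line in lines:
--         lowered = line.lower()
--         if lowered in {"laanmd", "tion", "ion", "ihmtl"}:
--             continue
--         if any(
--             marker in lowered
--             for marker in (
--                 "suggested reading",
--                 "encyclop",
--                 "britannica",
--                 "major article",
--                 "major at",
--                 "major ar",
--                 "dealing with",
--                 "classification of living things",
--                 "living things",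
--                 "reference inform",
--                 "selected e",
--                 "micro paedia",
--                 "micropaedia",
--             )
--         ):
--             if "micro" in lowered or "reference inform" in lowered:
--                 break
--             continue
--         cleaned.append(line)
--     return cleaned
-- ===== SOURCE B (Python) =====
-- MARKERS = (
--     "suggested reading",
--     "encyclop",
--     "britannica",
--     "major article",
--     "major at",
--     "major ar",
--     "dealing with",
--     "classification of living things",
--     "living things",
--     "reference inform",
--     "selected e",
--     "micro paedia",
--     "micropaedia",
-- )
--
-- NOISE = {"laanmd", "tion", "ion", "ihmtl"}
--
--
-- def _is_cut(line: str) -> bool: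
--     low = line.lower()
--     return any(m in low for m in MARKERS) and (
--         "micro" in low or "reference inform" in low
--     )
--
--
-- def _keep(line: str) -> bool:
--     low = line.lower()
--     return low not in NOISE and not any(m in low for m in MARKERS)
--
--
-- def clean_dense_crop_lines(lines: list[str]) -> list[str]:
--     # pass 1: find the cut boundary (first line that both matches a marker
--     # and mentions micro / reference inform)
--     cut = len(lines)
--     for i, line in enumerate(lines):
--         if _is_cut(line):
--             cut = i
--             break
--     # pass 2: clean the prefix before the boundary
--     return [line for line in lines[:cut] if _keep(line)]
-- ===== Notes on version B (the rewrite author's own statement) =====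
-- stated objective: simpler
-- what changed: Replaces the single interleaved skip/break/append loop by a two-pass 'find the cut boundary, then filter the prefix' shape: a break predicate locates the first cut line, and a plain comprehension removes noise and marker lines from the prefix.
import Mathlib
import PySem

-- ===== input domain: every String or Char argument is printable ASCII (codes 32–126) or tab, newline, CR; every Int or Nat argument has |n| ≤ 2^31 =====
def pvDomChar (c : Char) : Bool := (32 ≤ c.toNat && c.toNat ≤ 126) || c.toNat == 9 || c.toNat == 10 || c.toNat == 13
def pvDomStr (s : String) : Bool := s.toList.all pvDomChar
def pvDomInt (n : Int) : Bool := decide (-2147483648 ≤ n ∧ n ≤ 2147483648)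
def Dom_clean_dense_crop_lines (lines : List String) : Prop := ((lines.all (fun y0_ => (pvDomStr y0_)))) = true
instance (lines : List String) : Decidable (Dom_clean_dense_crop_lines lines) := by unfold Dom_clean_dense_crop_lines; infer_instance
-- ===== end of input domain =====

-- ===== PORT A =====
-- B: two-pass 'find the cut boundary, then filter the prefix' instead of A's single loop with skip/break/append (objective: simpler decomposition; same cost).

def pvMarkers : List String :=
  ["suggested reading", "encyclop", "britannica", "major article", "major at",
   "major ar", "dealing with", "classification of living things", "living things",
   "reference inform", "selected e", "micro paedia", "micropaedia"]

def pvNoise : List String := ["laanmd", "tion", "ion", "ihmtl"]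

-- literal transliteration of A's loop: noise lines are skipped, a marker line
-- either breaks (returning what was collected so far) or is skipped, others kept
def clean_dense_crop_lines (lines : List String) : List String :=
  match lines with
  | [] => []
  | line :: rest =>
    let lowered := PySem.Str.lower line
    if lowered ∈ pvNoise then
      clean_dense_crop_lines rest
    else if pvMarkers.any (fun m => PySem.Str.isIn m lowered) then
      if PySem.Str.isIn "micro" lowered || PySem.Str.isIn "reference inform" lowered then
        []
      else
        clean_dense_crop_lines rest
    else
      line :: clean_dense_crop_lines rest

-- ===== PORT B =====
def pvIsCut (line : String) : Bool :=
  let low := PySem.Str.lower line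
  pvMarkers.any (fun m => PySem.Str.isIn m low) &&
    (PySem.Str.isIn "micro" low || PySem.Str.isIn "reference inform" low)

def pvKeep (line : String) : Bool :=
  let low := PySem.Str.lower line
  !(low ∈ pvNoise) && !(pvMarkers.any (fun m => PySem.Str.isIn m low))

-- pass 1 (lines[:cut] with cut = first is_cut index) = takeWhile; pass 2 = filter
def clean_dense_crop_lines_alt (lines : List String) : List String :=
  (lines.takeWhile (fun l => !pvIsCut l)).filter pvKeep

-- ===== PRECONDITION & SPEC =====
def Spec_clean_dense_crop_lines (lines : List String) (out : List String) : Prop := out = clean_dense_crop_lines_alt lines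
instance (lines : List String) (out : List String) : Decidable (Spec_clean_dense_crop_lines lines out) := by unfold Spec_clean_dense_crop_lines; infer_instance

-- ===== CLAIM (what is proved, stated in full; the proofs are below) =====
def Claim_equal_clean_dense_crop_lines : Prop := ∀ (lines : List String), Dom_clean_dense_crop_lines lines → Spec_clean_dense_crop_lines lines (clean_dense_crop_lines lines)

-- ===== LEMMAS AND PROOFS =====

-- ===== VERDICT (by name: the statement is the Claim_ definition above) =====
-- the four noise strings match no marker, so a noise line is never a cut line
lemma pvNoise_no_marker (low : String) (h : low ∈ pvNoise) :
    pvMarkers.any (fun m => PySem.Str.isIn m low) = false := by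
  simp only [pvNoise, List.mem_cons, List.not_mem_nil, or_false] at h
  rcases h with h | h | h | h <;> subst h <;> decide

lemma clean_eq (lines : List String) :
    clean_dense_crop_lines lines = clean_dense_crop_lines_alt lines := by
  induction lines with
  | nil => rfl
  | cons line rest ih =>
    unfold clean_dense_crop_lines clean_dense_crop_lines_alt
    by_cases hn : PySem.Str.lower line ∈ pvNoise
    · have hm := pvNoise_no_marker _ hn
      have hcut : pvIsCut line = false := by unfold pvIsCut; simp only [hm, Bool.false_and]
      have hk : pvKeep line = false := by
        unfold pvKeep; simp only [hn, decide_true, Bool.not_true, Bool.false_and]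
      simp only [List.takeWhile_cons, List.filter_cons, hcut, hk, Bool.not_false, if_true,
        Bool.false_eq_true, if_false, if_pos hn, ih, clean_dense_crop_lines_alt]
    · by_cases hc : (PySem.Str.isIn "micro" (PySem.Str.lower line) ||
          PySem.Str.isIn "reference inform" (PySem.Str.lower line)) = true
      · by_cases hmk : pvMarkers.any (fun m => PySem.Str.isIn m (PySem.Str.lower line)) = true
        · have hcut : pvIsCut line = true := by
            unfold pvIsCut; simp only [hmk, hc, Bool.true_and]
          simp only [List.takeWhile_cons, hcut, Bool.not_true, Bool.false_eq_true, if_false,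
            if_neg hn, hmk, if_true, hc, List.filter_nil]
        · have hmk' : pvMarkers.any (fun m => PySem.Str.isIn m (PySem.Str.lower line)) = false :=
            Bool.eq_false_iff.mpr hmk
          have hcut : pvIsCut line = false := by
            unfold pvIsCut; simp only [hmk', Bool.false_and]
          have hk : pvKeep line = true := by
            unfold pvKeep; simp only [hn, hmk', decide_false, Bool.not_false, Bool.and_self]
          simp only [List.takeWhile_cons, List.filter_cons, hcut, hk, Bool.not_false, if_true,
            if_neg hn, hmk', Bool.false_eq_true, if_false, ih, clean_dense_crop_lines_alt]
      · have hc' : (PySem.Str.isIn "micro" (PySem.Str.lower line) ||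
            PySem.Str.isIn "reference inform" (PySem.Str.lower line)) = false :=
          Bool.eq_false_iff.mpr hc
        have hcut : pvIsCut line = false := by
          unfold pvIsCut; simp only [hc', Bool.and_false]
        by_cases hmk : pvMarkers.any (fun m => PySem.Str.isIn m (PySem.Str.lower line)) = true
        · have hk : pvKeep line = false := by
            unfold pvKeep; simp only [hmk, Bool.not_true, Bool.and_false]
          simp only [List.takeWhile_cons, List.filter_cons, hcut, hk, Bool.not_false, if_true,
            Bool.false_eq_true, if_false, if_neg hn, hmk, hc', ih, clean_dense_crop_lines_alt]
        · have hmk' : pvMarkers.any (fun m => PySem.Str.isIn m (PySem.Str.lower line)) = false :=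
            Bool.eq_false_iff.mpr hmk
          have hk : pvKeep line = true := by
            unfold pvKeep; simp only [hn, hmk', decide_false, Bool.not_false, Bool.and_self]
          simp only [List.takeWhile_cons, List.filter_cons, hcut, hk, Bool.not_false, if_true,
            if_neg hn, hmk', Bool.false_eq_true, if_false, ih, clean_dense_crop_lines_alt]

theorem clean_dense_crop_lines_spec : Claim_equal_clean_dense_crop_lines := by
  intro lines _
  unfold Spec_clean_dense_crop_lines
  exact clean_eq lines
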